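-- pv_equiv track=rewrite | github.com/Hyunta/Algorithm | Test/2021 LINE 공채/2.py | solution
-- ===== SOURCE A (Python) =====
-- from collections import defaultdict
--
-- def solution(research, n, k):
--     issue = {}
--     seq = {}
--     seq_val = defaultdict(list)
--     tot = 2 * n * k
--     for i in range(len(research)):
--         daily = {}
--         for x in research[i]:
--             daily[x] = daily.get(x, 0) + 1
--         daily = {key: v for key, v in daily.items() if v >= k}
--         seq = {k: v for k, v in seq.items() if k in daily.keys()}
--         for key, value in daily.items():
--             seq[key] = seq.get(key, 0) + 1
--             seq_val[key].append(value)
--         for key in seq.keys():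
--             if seq[key] == n:
--                 seq[key] -= 1
--                 if sum(seq_val[key][-n:]) >= tot:
--                     issue[key] = issue.get(key,0) + 1
--     result = []
--     for a,b in issue.items():
--         if b == max(issue.values()):
--             result.append(a)
--     result.sort()
--     if result:
--         return result[0]
--     else:
--         return "None"
-- ===== SOURCE B (Python) =====
-- from collections import Counter
--
--
-- def solution(research, n, k):
--     # Key-major rewrite: one windowed streak scan per distinct item instead of
--     # re-summing the last n daily counts on every day.
--     if n <= 0:
--         return "None"
--     tot = 2 * n * k
--     days = [Counter(day) for day in research]
--     keys = list(dict.fromkeys(x for day in research for x in day))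
--     issue = {}
--     for key in keys:
--         run = 0
--         window = []   # counts of the last min(run, n) consecutive qualifying days
--         wsum = 0
--         cnt = 0
--         for day in days:
--             c = day.get(key, 0)
--             if c >= k and c > 0:
--                 run += 1
--                 window = window + [c]
--                 wsum += c
--                 if len(window) > n:
--                     wsum -= window[0]
--                     window = window[1:]
--                 if run >= n and wsum >= tot:
--                     cnt += 1
--             else:
--                 run = 0
--                 window = []
--                 wsum = 0
--         if cnt > 0:
--             issue[key] = cnt
--     if not issue:
--         return "None"
--     best = max(issue.values())
--     return min(a for a, b in issue.items() if b == best)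
-- ===== Notes on version B (the rewrite author's own statement) =====
-- stated objective: alternative
-- what changed: Key-major rewrite: instead of A's day-major pass that rebuilds per-day dicts and re-sums the last n daily counts on every trigger check (and recomputes max(issue.values()) inside the result loop), B precomputes one Counter per day, then runs an independent streak scan per distinct item with a sliding window and running window sum, computes max once and takes min of the tied keys directly.
import Mathlib
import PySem

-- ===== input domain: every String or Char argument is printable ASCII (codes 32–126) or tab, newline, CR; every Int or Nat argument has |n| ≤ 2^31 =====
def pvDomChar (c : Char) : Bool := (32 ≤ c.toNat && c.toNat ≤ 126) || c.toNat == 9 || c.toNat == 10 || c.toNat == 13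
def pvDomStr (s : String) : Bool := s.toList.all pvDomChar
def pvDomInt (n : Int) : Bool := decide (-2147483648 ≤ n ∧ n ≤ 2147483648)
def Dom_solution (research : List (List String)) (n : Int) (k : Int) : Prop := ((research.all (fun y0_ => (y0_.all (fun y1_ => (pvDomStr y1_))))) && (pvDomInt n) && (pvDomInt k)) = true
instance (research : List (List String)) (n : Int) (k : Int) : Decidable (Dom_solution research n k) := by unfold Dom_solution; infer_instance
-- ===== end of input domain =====

-- B is a key-major rewrite of A: one sliding-window streak scan per distinct item
-- (running window sum) instead of A's day-major dict juggling that re-sums the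
-- last n daily counts on every day; same return value, proved below.

-- ===== PORT A =====
-- one iteration of `for i in range(len(research))` acting on (issue, seq, seq_val)
def solutionStep (n k tot : Int)
    (st : PySem.Dict String Int × PySem.Dict String Int × PySem.Dict String (List Int))
    (day : List String) :
    PySem.Dict String Int × PySem.Dict String Int × PySem.Dict String (List Int) :=
  let issue := st.1
  let seq0 := st.2.1
  let seq_val0 := st.2.2
  -- daily = {}; for x in research[i]: daily[x] = daily.get(x, 0) + 1
  let daily0 := day.foldl (fun d x => d.insert x (d.getD x 0 + 1)) PySem.Dict.empty
  -- daily = {key: v for key, v in daily.items() if v >= k}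
  let daily : PySem.Dict String Int := PySem.Dict.mk (daily0.items.filter (fun p => p.2 ≥ k))
  -- seq = {k: v for k, v in seq.items() if k in daily.keys()}
  let seq1 : PySem.Dict String Int := PySem.Dict.mk (seq0.items.filter (fun p => daily.contains p.1))
  -- for key, value in daily.items(): seq[key] = seq.get(key, 0) + 1; seq_val[key].append(value)
  let ss := daily.items.foldl
      (fun (ss : PySem.Dict String Int × PySem.Dict String (List Int)) kv =>
        (ss.1.insert kv.1 (ss.1.getD kv.1 0 + 1), ss.2.modify kv.1 [] (fun l => l ++ [kv.2])))
      (seq1, seq_val0)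
  let seq2 := ss.1
  let seq_val := ss.2
  -- for key in seq.keys(): if seq[key] == n: seq[key] -= 1; if sum(seq_val[key][-n:]) >= tot: issue[key] += 1
  let fin := seq2.keys.foldl
      (fun (p : PySem.Dict String Int × PySem.Dict String Int) key =>
        if p.2.getD key 0 = n then
          let s2 := p.2.insert key (p.2.getD key 0 - 1)
          if (PySem.List.slice (seq_val.getD key []) (some (-n)) none).sum ≥ tot then
            (p.1.insert key (p.1.getD key 0 + 1), s2)
          else (p.1, s2)
        else (p.1, p.2))
      (issue, seq2)
  (fin.1, fin.2, seq_val)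

def solution (research : List (List String)) (n : Int) (k : Int) : String :=
  let tot := 2 * n * k
  let st := (PySem.List.pyRange 0 (PySem.List.len research)).foldl
      (fun st i => solutionStep n k tot st (PySem.List.pyGetD research i []))
      (PySem.Dict.empty, PySem.Dict.empty, PySem.Dict.empty)
  let issue := st.1
  -- result = [a for a, b in issue.items() if b == max(issue.values())]
  let result := issue.items.foldl
      (fun r ab => if PySem.List.max? issue.values (fun v => v) = some ab.2 then r ++ [ab.1] else r) []
  let result := PySem.List.sorted result (fun x => x)
  match result with
  | [] => "None"
  | x :: _ => x

-- ===== PORT B =====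
-- one day of B's per-key scan: running streak `run`, window of the last
-- min(run, n) qualifying counts with its running sum, and the trigger count
def solutionScanStep (n k tot : Int) (key : String)
    (st : Int × List Int × Int × Int) (day : PySem.Dict String Int) :
    Int × List Int × Int × Int :=
  let c := day.getD key 0
  if c ≥ k ∧ 0 < c then
    let run := st.1 + 1
    let window := st.2.1 ++ [c]
    let wsum := st.2.2.1 + c
    let ww := if (window.length : Int) > n then (window.drop 1, wsum - window.headD 0)
              else (window, wsum)
    if n ≤ run ∧ ww.2 ≥ tot then (run, ww.1, ww.2, st.2.2.2 + 1)
    else (run, ww.1, ww.2, st.2.2.2)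
  else (0, [], 0, st.2.2.2)

def solution_alt (research : List (List String)) (n : Int) (k : Int) : String :=
  if n ≤ 0 then "None" else
  let tot := 2 * n * k
  let days := research.map (fun day => PySem.Dict.counter day)
  let keys := PySem.List.dedup (research.flatMap (fun day => day))
  let issue := keys.foldl
      (fun (iss : PySem.Dict String Int) key =>
        let st := days.foldl (solutionScanStep n k tot key) (0, [], 0, 0)
        if 0 < st.2.2.2 then iss.insert key st.2.2.2 else iss)
      PySem.Dict.empty
  if issue.items.isEmpty then "None" else
  match PySem.List.max? issue.values (fun v => v) with
  | none => "None"   -- unreachable: issue is non-empty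
  | some best =>
      match PySem.List.min? ((issue.items.filter (fun p => p.2 = best)).map (fun p => p.1)) (fun s => s) with
      | none => "None"   -- unreachable: best is attained
      | some m => m

-- ===== PRECONDITION & SPEC =====
def Spec_solution (research : List (List String)) (n : Int) (k : Int) (out : String) : Prop := out = solution_alt research n k
instance (research : List (List String)) (n : Int) (k : Int) (out : String) : Decidable (Spec_solution research n k out) := by unfold Spec_solution; infer_instance

-- ===== CLAIM (what is proved, stated in full; the proofs are below) =====
def Claim_equal_solution : Prop := ∀ (research : List (List String)) (n : Int) (k : Int), Dom_solution research n k → Spec_solution research n k (solution research n k)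

-- ===== LEMMAS AND PROOFS =====

-- B's per-key scan over the raw days (counters pushed inside), and its trigger count
def bScan (n k tot : Int) (key : String) (days : List (List String))
    (st : Int × List Int × Int × Int) : Int × List Int × Int × Int :=
  days.foldl (fun st day => solutionScanStep n k tot key st (PySem.Dict.counter day)) st

def cntOf (n k tot : Int) (key : String) (days : List (List String)) : Int :=
  (bScan n k tot key days (0, [], 0, 0)).2.2.2

-- A's fold over the days
def aFold (n k tot : Int) (days : List (List String))
    (st : PySem.Dict String Int × PySem.Dict String Int × PySem.Dict String (List Int)) :
    PySem.Dict String Int × PySem.Dict String Int × PySem.Dict String (List Int) :=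
  days.foldl (solutionStep n k tot) st

-- global invariant of A's state
def GInv (st : PySem.Dict String Int × PySem.Dict String Int × PySem.Dict String (List Int)) : Prop :=
  st.1.keys.Nodup ∧ st.2.1.keys.Nodup ∧
  (∀ key, st.1.contains key = true ↔ 1 ≤ st.1.getD key 0)

-- per-key simulation relation between A's state and B's scan state (for 1 ≤ n)
def PRel (n : Int) (key : String)
    (st : PySem.Dict String Int × PySem.Dict String Int × PySem.Dict String (List Int))
    (b : Int × List Int × Int × Int) : Prop :=
  st.1.getD key 0 = b.2.2.2 ∧
  st.2.1.get? key = (if b.1 = 0 then none else some (if n ≤ b.1 then n - 1 else b.1)) ∧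
  0 ≤ b.1 ∧
  (b.2.1.length : Int) = min b.1 n ∧
  b.2.2.1 = b.2.1.sum ∧
  (∃ pre, st.2.2.getD key [] = pre ++ b.2.1)

-- ---- generic dict helpers ----

theorem get?_mk_of_not_mem {ν : Type} (items : List (String × ν)) (key : String)
    (h : key ∉ items.map Prod.fst) : (PySem.Dict.mk items).get? key = none := by
  induction items with
  | nil => rfl
  | cons p rest ih =>
      simp only [List.map_cons, List.mem_cons] at h
      push Not at h
      rw [PySem.Dict.get?_mk_cons]
      simp only [beq_iff_eq]
      rw [if_neg (by exact fun hc => h.1 (hc ▸ rfl))]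
      exact ih h.2

theorem get?_mk_map {ν : Type} (l : List String) (f : String → ν) (key : String) :
    (PySem.Dict.mk (l.map (fun x => (x, f x)))).get? key
      = if key ∈ l then some (f key) else none := by
  induction l with
  | nil => rfl
  | cons x rest ih =>
      simp only [List.map_cons]
      rw [PySem.Dict.get?_mk_cons]
      by_cases hx : x = key
      · subst hx; simp
      · have hne : ¬ key = x := fun h => hx h.symm
        simp [beq_iff_eq, hx, ih, List.mem_cons, hne]

theorem contains_eq_isSome {ν : Type} (d : PySem.Dict String ν) (key : String) :
    d.contains key = (d.get? key).isSome := by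
  cases h : d.get? key with
  | none =>
      have hc := (PySem.Dict.get?_eq_none_iff_contains d key).mp h
      simp [hc]
  | some v =>
      by_cases hc : d.contains key = false
      · rw [(PySem.Dict.get?_eq_none_iff_contains d key).mpr hc] at h; cases h
      · simp only [Option.isSome_some]
        cases hb : d.contains key
        · exact absurd hb hc
        · rfl

theorem get?_mk_filter {ν : Type} (items : List (String × ν)) (p : String × ν → Bool)
    (hnd : (items.map Prod.fst).Nodup) (key : String) :
    (PySem.Dict.mk (items.filter p)).get? key
      = ((PySem.Dict.mk items).get? key).bind (fun v => if p (key, v) then some v else none) := by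
  induction items with
  | nil => rfl
  | cons q rest ih =>
      obtain ⟨k0, v0⟩ := q
      simp only [List.map_cons, List.nodup_cons] at hnd
      simp only [List.filter_cons]
      by_cases hq : p (k0, v0) = true
      · rw [if_pos hq, PySem.Dict.get?_mk_cons, PySem.Dict.get?_mk_cons]
        by_cases hk : k0 = key
        · subst hk; simp [hq]
        · have : (k0 == key) = false := beq_false_of_ne hk
          simp [this, ih hnd.2]
      · rw [if_neg hq, PySem.Dict.get?_mk_cons, ih hnd.2]
        by_cases hk : k0 = key
        · subst hk
          simp only [beq_self_eq_true, if_pos]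
          have hnone : (PySem.Dict.mk rest).get? k0 = none :=
            get?_mk_of_not_mem rest k0 hnd.1
          rw [hnone]
          simp [hq]
        · have : (k0 == key) = false := beq_false_of_ne hk
          simp [this]

-- a fold inserting only keys drawn from l leaves other keys untouched
theorem foldl_insert_key_get?_of_not_mem {β ν : Type} (l : List β) (keyf : β → String)
    (f : PySem.Dict String ν → β → ν) (s : PySem.Dict String ν) (key : String)
    (h : key ∉ l.map keyf) :
    (l.foldl (fun s b => s.insert (keyf b) (f s b)) s).get? key = s.get? key := by
  induction l generalizing s with
  | nil => rfl
  | cons b rest ih =>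
      simp only [List.map_cons, List.mem_cons] at h
      push Not at h
      simp only [List.foldl_cons]
      rw [ih _ h.2, PySem.Dict.get?_insert_of_ne _ _ h.1]

theorem foldl_insert_pairs_get? (l : List (String × Int)) (hl : (l.map Prod.fst).Nodup)
    (s : PySem.Dict String Int) (key : String) :
    (l.foldl (fun s kv => s.insert kv.1 (s.getD kv.1 0 + 1)) s).get? key
      = if key ∈ l.map Prod.fst then some (s.getD key 0 + 1) else s.get? key := by
  induction l generalizing s with
  | nil => simp
  | cons kv tail ih =>
      obtain ⟨k0, v0⟩ := kv
      simp only [List.map_cons, List.nodup_cons] at hl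
      simp only [List.foldl_cons, List.map_cons, List.mem_cons]
      by_cases hk : key = k0
      · subst hk
        rw [if_pos (Or.inl rfl)]
        have := foldl_insert_key_get?_of_not_mem tail Prod.fst
          (fun s kv => s.getD kv.1 0 + 1) (s.insert key (s.getD key 0 + 1)) key hl.1
        rw [ih hl.2]
        rw [if_neg (by
          intro hmem
          exact hl.1 hmem)]
        exact PySem.Dict.get?_insert_self s key (s.getD key 0 + 1)
      · rw [ih hl.2]
        have h1 : (s.insert k0 (s.getD k0 0 + 1)).getD key 0 = s.getD key 0 :=
          PySem.Dict.getD_insert_of_ne s _ _ hk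
        have h2 : (s.insert k0 (s.getD k0 0 + 1)).get? key = s.get? key :=
          PySem.Dict.get?_insert_of_ne s _ hk
        rw [h1, h2]
        by_cases hm : key ∈ tail.map Prod.fst
        · rw [if_pos hm, if_pos (Or.inr hm)]
        · rw [if_neg hm, if_neg (by rintro (h | h); exacts [hk h, hm h])]

-- ---- the daily dict ----

def dailyOf (k : Int) (day : List String) : PySem.Dict String Int :=
  PySem.Dict.mk ((PySem.Dict.counter day).items.filter (fun p => decide (p.2 ≥ k)))

def qualKeys (k : Int) (day : List String) : List String :=
  (PySem.Set.ofList day).filter (fun x => decide ((k : Int) ≤ (day.count x : Int)))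

theorem dailyOf_items (k : Int) (day : List String) :
    (dailyOf k day).items = (qualKeys k day).map (fun x => (x, (day.count x : Int))) := by
  show ((PySem.Dict.counter day).items.filter _) = _
  rw [PySem.Dict.items_counter, List.filter_map]
  rfl

theorem qualKeys_nodup (k : Int) (day : List String) : (qualKeys k day).Nodup :=
  (PySem.Set.nodup_ofList day).filter _

theorem mem_qualKeys (k : Int) (day : List String) (key : String) :
    key ∈ qualKeys k day ↔ (k ≤ (day.count key : Int) ∧ 0 < (day.count key : Int)) := by
  unfold qualKeys
  rw [List.mem_filter, PySem.Set.mem_ofList]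
  constructor
  · rintro ⟨hmem, hge⟩
    refine ⟨by simpa using hge, ?_⟩
    exact_mod_cast List.count_pos_iff.mpr hmem
  · rintro ⟨hge, hpos⟩
    refine ⟨List.count_pos_iff.mp (by exact_mod_cast hpos), by simpa using hge⟩

theorem dailyOf_eq_mk_map (k : Int) (day : List String) :
    dailyOf k day = PySem.Dict.mk ((qualKeys k day).map (fun x => (x, (day.count x : Int)))) := by
  apply PySem.Dict.ext
  rw [dailyOf_items]

theorem dailyOf_get? (k : Int) (day : List String) (key : String) :
    (dailyOf k day).get? key
      = if (k ≤ (day.count key : Int) ∧ 0 < (day.count key : Int))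
        then some (day.count key : Int) else none := by
  rw [dailyOf_eq_mk_map, get?_mk_map]
  by_cases h : key ∈ qualKeys k day
  · rw [if_pos h, if_pos ((mem_qualKeys k day key).mp h)]
  · rw [if_neg h, if_neg (fun hc => h ((mem_qualKeys k day key).mpr hc))]

theorem dailyOf_contains (k : Int) (day : List String) (key : String) :
    (dailyOf k day).contains key
      = decide (k ≤ (day.count key : Int) ∧ 0 < (day.count key : Int)) := by
  rw [contains_eq_isSome, dailyOf_get?]
  by_cases h : (k ≤ (day.count key : Int) ∧ 0 < (day.count key : Int))
  · rw [if_pos h, decide_eq_true h]; rfl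
  · rw [if_neg h, decide_eq_false h]; rfl

-- ---- the trigger loop ----

def trigStep (n tot : Int) (sv : PySem.Dict String (List Int))
    (p : PySem.Dict String Int × PySem.Dict String Int) (key : String) :
    PySem.Dict String Int × PySem.Dict String Int :=
  if p.2.getD key 0 = n then
    let s2 := p.2.insert key (p.2.getD key 0 - 1)
    if (PySem.List.slice (sv.getD key []) (some (-n)) none).sum ≥ tot then
      (p.1.insert key (p.1.getD key 0 + 1), s2)
    else (p.1, s2)
  else (p.1, p.2)

def fired (n tot : Int) (sv : PySem.Dict String (List Int)) (s : PySem.Dict String Int)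
    (key : String) : Bool :=
  s.getD key 0 == n && ((PySem.List.slice (sv.getD key []) (some (-n)) none).sum ≥ tot : Bool)

theorem trig_not_mem (n tot : Int) (sv : PySem.Dict String (List Int))
    (l : List String) (p : PySem.Dict String Int × PySem.Dict String Int) (key : String)
    (h : key ∉ l) :
    ((l.foldl (trigStep n tot sv) p).1.get? key = p.1.get? key ∧
     (l.foldl (trigStep n tot sv) p).2.get? key = p.2.get? key) := by
  induction l generalizing p with
  | nil => exact ⟨rfl, rfl⟩
  | cons key' tail ih =>
      simp only [List.mem_cons] at h
      push Not at h
      simp only [List.foldl_cons]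
      obtain ⟨ih1, ih2⟩ := ih (trigStep n tot sv p key') h.2
      rw [ih1, ih2]
      unfold trigStep
      split_ifs <;>
        simp only [PySem.Dict.get?_insert_of_ne _ _ h.1, and_self]

theorem trigStep_snd_get?_self (n tot : Int) (sv : PySem.Dict String (List Int))
    (p : PySem.Dict String Int × PySem.Dict String Int) (key : String) :
    (trigStep n tot sv p key).2.get? key
      = (if p.2.getD key 0 = n then some (p.2.getD key 0 - 1) else p.2.get? key) := by
  unfold trigStep
  split_ifs with hc hs
  · exact PySem.Dict.get?_insert_self _ _ _
  · exact PySem.Dict.get?_insert_self _ _ _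
  · rfl

theorem trigStep_fst_getD_self (n tot : Int) (sv : PySem.Dict String (List Int))
    (p : PySem.Dict String Int × PySem.Dict String Int) (key : String) :
    (trigStep n tot sv p key).1.getD key 0
      = p.1.getD key 0 + (if fired n tot sv p.2 key = true then 1 else 0) := by
  by_cases hc : p.2.getD key 0 = n
  · by_cases hs : (PySem.List.slice (sv.getD key []) (some (-n)) none).sum ≥ tot
    · unfold trigStep fired
      rw [if_pos hc, if_pos hs]
      simp [hc, hs, PySem.Dict.getD_insert_self]
    · unfold trigStep fired
      rw [if_pos hc, if_neg hs]
      simp [hs]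
  · unfold trigStep fired
    rw [if_neg hc]
    simp [hc]

theorem trigStep_fst_contains_self (n tot : Int) (sv : PySem.Dict String (List Int))
    (p : PySem.Dict String Int × PySem.Dict String Int) (key : String) :
    (trigStep n tot sv p key).1.contains key
      = (p.1.contains key || fired n tot sv p.2 key) := by
  by_cases hc : p.2.getD key 0 = n
  · by_cases hs : (PySem.List.slice (sv.getD key []) (some (-n)) none).sum ≥ tot
    · unfold trigStep fired
      rw [if_pos hc, if_pos hs]
      rw [contains_eq_isSome, PySem.Dict.get?_insert_self]
      simp [hc, hs]
    · unfold trigStep fired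
      rw [if_pos hc, if_neg hs]
      simp [hs]
  · unfold trigStep fired
    rw [if_neg hc]
    simp [hc]

theorem trig_char (n tot : Int) (sv : PySem.Dict String (List Int))
    (l : List String) (hl : l.Nodup)
    (p : PySem.Dict String Int × PySem.Dict String Int) (key : String) (hmem : key ∈ l) :
    ((l.foldl (trigStep n tot sv) p).2.get? key
        = (if p.2.getD key 0 = n then some (p.2.getD key 0 - 1) else p.2.get? key) ∧
     (l.foldl (trigStep n tot sv) p).1.getD key 0
        = p.1.getD key 0 + (if fired n tot sv p.2 key = true then 1 else 0) ∧
     (l.foldl (trigStep n tot sv) p).1.contains key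
        = (p.1.contains key || fired n tot sv p.2 key)) := by
  induction l generalizing p with
  | nil => cases hmem
  | cons key' tail ih =>
      simp only [List.nodup_cons] at hl
      simp only [List.foldl_cons]
      by_cases hk : key = key'
      · subst hk
        obtain ⟨h1, h2⟩ := trig_not_mem n tot sv tail (trigStep n tot sv p key) key hl.1
        refine ⟨?_, ?_, ?_⟩
        · rw [h2, trigStep_snd_get?_self]
        · rw [PySem.Dict.getD_eq_get?_getD, h1, ← PySem.Dict.getD_eq_get?_getD,
            trigStep_fst_getD_self]
        · rw [contains_eq_isSome, h1, ← contains_eq_isSome, trigStep_fst_contains_self]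
      · have hmem' : key ∈ tail := by
          rcases List.mem_cons.mp hmem with h | h
          · exact absurd h hk
          · exact h
        have hstep1 : (trigStep n tot sv p key').1.get? key = p.1.get? key := by
          unfold trigStep
          split_ifs <;> simp [PySem.Dict.get?_insert_of_ne _ _ hk]
        have hstep2 : (trigStep n tot sv p key').2.get? key = p.2.get? key := by
          unfold trigStep
          split_ifs <;> simp [PySem.Dict.get?_insert_of_ne _ _ hk]
        obtain ⟨i1, i2, i3⟩ := ih hl.2 (trigStep n tot sv p key') hmem'
        have e2 : (trigStep n tot sv p key').2.getD key 0 = p.2.getD key 0 := by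
          rw [PySem.Dict.getD_eq_get?_getD, hstep2, ← PySem.Dict.getD_eq_get?_getD]
        have e1 : (trigStep n tot sv p key').1.getD key 0 = p.1.getD key 0 := by
          rw [PySem.Dict.getD_eq_get?_getD, hstep1, ← PySem.Dict.getD_eq_get?_getD]
        have ec : (trigStep n tot sv p key').1.contains key = p.1.contains key := by
          rw [contains_eq_isSome, hstep1, ← contains_eq_isSome]
        have ef : fired n tot sv (trigStep n tot sv p key').2 key = fired n tot sv p.2 key := by
          unfold fired
          rw [e2]
        refine ⟨?_, ?_, ?_⟩
        · rw [i1, e2, hstep2]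
        · rw [i2, e1, ef]
        · rw [i3, ec, ef]

theorem trig_fst_nodup (n tot : Int) (sv : PySem.Dict String (List Int))
    (l : List String) (p : PySem.Dict String Int × PySem.Dict String Int)
    (h : p.1.keys.Nodup) : (l.foldl (trigStep n tot sv) p).1.keys.Nodup := by
  induction l generalizing p with
  | nil => exact h
  | cons key tail ih =>
      simp only [List.foldl_cons]
      apply ih
      unfold trigStep
      split_ifs
      · exact PySem.Dict.nodup_keys_insert _ _ _ h
      · exact h
      · exact h

-- ---- characterization of one A-day ----

theorem trig_snd_nodup (n tot : Int) (sv : PySem.Dict String (List Int))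
    (l : List String) (p : PySem.Dict String Int × PySem.Dict String Int)
    (h : p.2.keys.Nodup) : (l.foldl (trigStep n tot sv) p).2.keys.Nodup := by
  induction l generalizing p with
  | nil => exact h
  | cons key tail ih =>
      simp only [List.foldl_cons]
      apply ih
      unfold trigStep
      split_ifs
      · exact PySem.Dict.nodup_keys_insert _ _ _ h
      · exact PySem.Dict.nodup_keys_insert _ _ _ h
      · exact h

theorem filter_beq_of_nodup (l : List String) (hl : l.Nodup) (key : String) :
    l.filter (fun x => x == key) = if key ∈ l then [key] else [] := by
  induction l with
  | nil => simp
  | cons x tail ih =>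
      simp only [List.nodup_cons] at hl
      simp only [List.filter_cons]
      by_cases hx : x = key
      · subst hx
        rw [if_pos (by simp), if_pos (List.mem_cons_self ..)]
        have : tail.filter (fun y => y == x) = [] := by
          rw [ih hl.2, if_neg hl.1]
        rw [this]
      · have : (x == key) = false := beq_false_of_ne hx
        simp only [this, Bool.false_eq_true, if_false, ih hl.2, List.mem_cons]
        by_cases hm : key ∈ tail
        · rw [if_pos hm, if_pos (Or.inr hm)]
        · rw [if_neg hm, if_neg (by rintro (h | h); exacts [hx h.symm, hm h])]

theorem mk_filter_keys_nodup {ν : Type} (d : PySem.Dict String ν) (p : String × ν → Bool)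
    (h : d.keys.Nodup) : (PySem.Dict.mk (d.items.filter p)).keys.Nodup := by
  have hsub : ((d.items.filter p).map (fun q => q.1)).Sublist (d.items.map (fun q => q.1)) :=
    List.Sublist.map _ List.filter_sublist
  exact hsub.nodup h

theorem dailyOf_items_map_fst (k : Int) (day : List String) :
    (dailyOf k day).items.map Prod.fst = qualKeys k day := by
  rw [dailyOf_items, List.map_map]
  have : (Prod.fst ∘ fun x => (x, (day.count x : Int))) = id := rfl
  rw [this, List.map_id]

theorem solutionStep_eq (n k tot : Int)
    (st : PySem.Dict String Int × PySem.Dict String Int × PySem.Dict String (List Int))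
    (day : List String) :
    solutionStep n k tot st day =
      (let D := dailyOf k day
       let S1 : PySem.Dict String Int := PySem.Dict.mk (st.2.1.items.filter (fun p => D.contains p.1))
       let S2 := D.items.foldl (fun s kv => s.insert kv.1 (s.getD kv.1 0 + 1)) S1
       let SV := D.items.foldl (fun sv kv => sv.modify kv.1 [] (fun l => l ++ [kv.2])) st.2.2
       let fin := S2.keys.foldl (trigStep n tot SV) (st.1, S2)
       (fin.1, fin.2, SV)) := by
  unfold solutionStep dailyOf trigStep
  simp only [PySem.Dict.foldl_insert_getD_add_one_eq_counter]
  simp only [PySem.List.foldl_prod_mk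
    (fun (s : PySem.Dict String Int) (kv : String × Int) => s.insert kv.1 (s.getD kv.1 0 + 1))
    (fun (sv : PySem.Dict String (List Int)) (kv : String × Int) => sv.modify kv.1 [] (fun l => l ++ [kv.2]))]

theorem stepA_char (n k tot : Int)
    (st : PySem.Dict String Int × PySem.Dict String Int × PySem.Dict String (List Int))
    (day : List String) (hG : GInv st) :
    GInv (solutionStep n k tot st day) ∧
    ∀ key,
      ((solutionStep n k tot st day).2.2.getD key []
          = (if k ≤ (day.count key : Int) ∧ 0 < (day.count key : Int)
             then st.2.2.getD key [] ++ [(day.count key : Int)] else st.2.2.getD key [])) ∧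
      ((solutionStep n k tot st day).2.1.get? key
          = (if k ≤ (day.count key : Int) ∧ 0 < (day.count key : Int)
             then (if st.2.1.getD key 0 + 1 = n then some (n - 1) else some (st.2.1.getD key 0 + 1))
             else none)) ∧
      ((solutionStep n k tot st day).1.getD key 0
          = st.1.getD key 0 +
            (if k ≤ (day.count key : Int) ∧ 0 < (day.count key : Int) ∧ st.2.1.getD key 0 + 1 = n ∧
                (PySem.List.slice (st.2.2.getD key [] ++ [(day.count key : Int)]) (some (-n)) none).sum ≥ tot
             then 1 else 0)) ∧
      ((solutionStep n k tot st day).1.contains key = true ↔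
         (st.1.contains key = true ∨ (k ≤ (day.count key : Int) ∧ 0 < (day.count key : Int) ∧
            st.2.1.getD key 0 + 1 = n ∧
            (PySem.List.slice (st.2.2.getD key [] ++ [(day.count key : Int)]) (some (-n)) none).sum ≥ tot))) := by
  rw [solutionStep_eq]
  simp only []
  set D := dailyOf k day with hD
  set S1 : PySem.Dict String Int := PySem.Dict.mk (st.2.1.items.filter (fun p => D.contains p.1)) with hS1
  set S2 := D.items.foldl (fun s kv => s.insert kv.1 (s.getD kv.1 0 + 1)) S1 with hS2
  set SV := D.items.foldl (fun sv kv => sv.modify kv.1 [] (fun l => l ++ [kv.2])) st.2.2 with hSV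
  -- S1 lookups
  have hS1get : ∀ key, S1.get? key
      = if k ≤ (day.count key : Int) ∧ 0 < (day.count key : Int) then st.2.1.get? key else none := by
    intro key
    rw [hS1, get?_mk_filter _ _ hG.2.1 key]
    by_cases hq : k ≤ (day.count key : Int) ∧ 0 < (day.count key : Int)
    · rw [if_pos hq]
      cases hv : st.2.1.get? key with
      | none => rfl
      | some v =>
          simp only [Option.bind_some]
          rw [if_pos (by rw [hD, dailyOf_contains, decide_eq_true hq])]
    · rw [if_neg hq]
      cases hv : st.2.1.get? key with
      | none => rfl
      | some v =>
          simp only [Option.bind_some]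
          rw [if_neg (by rw [hD, dailyOf_contains, decide_eq_false hq]; simp)]
  have hS1nodup : S1.keys.Nodup := mk_filter_keys_nodup _ _ hG.2.1
  -- S2 lookups
  have hmemfst : ∀ key, key ∈ D.items.map Prod.fst
      ↔ (k ≤ (day.count key : Int) ∧ 0 < (day.count key : Int)) := by
    intro key
    rw [hD, dailyOf_items_map_fst, mem_qualKeys]
  have hfstnodup : (D.items.map Prod.fst).Nodup := by
    rw [hD, dailyOf_items_map_fst]; exact qualKeys_nodup k day
  have hS2get : ∀ key, S2.get? key
      = if k ≤ (day.count key : Int) ∧ 0 < (day.count key : Int)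
        then some (st.2.1.getD key 0 + 1) else none := by
    intro key
    rw [hS2, foldl_insert_pairs_get? _ hfstnodup]
    by_cases hq : k ≤ (day.count key : Int) ∧ 0 < (day.count key : Int)
    · rw [if_pos ((hmemfst key).mpr hq), if_pos hq]
      rw [PySem.Dict.getD_eq_get?_getD, hS1get key, if_pos hq, ← PySem.Dict.getD_eq_get?_getD]
    · rw [if_neg (fun hc => hq ((hmemfst key).mp hc)), if_neg hq, hS1get key, if_neg hq]
  have hS2getD : ∀ key, S2.getD key 0
      = if k ≤ (day.count key : Int) ∧ 0 < (day.count key : Int)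
        then st.2.1.getD key 0 + 1 else 0 := by
    intro key
    rw [PySem.Dict.getD_eq_get?_getD, hS2get key]
    by_cases hq : k ≤ (day.count key : Int) ∧ 0 < (day.count key : Int)
    · rw [if_pos hq, if_pos hq]; rfl
    · rw [if_neg hq, if_neg hq]; rfl
  have hS2nodup : S2.keys.Nodup := by
    rw [hS2]
    exact PySem.Dict.nodup_keys_foldl_insert_key _ _ _ _ hS1nodup
  have hS2mem : ∀ key, key ∈ S2.keys
      ↔ (k ≤ (day.count key : Int) ∧ 0 < (day.count key : Int)) := by
    intro key
    rw [← PySem.Dict.contains_iff_mem_keys, contains_eq_isSome, hS2get key]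
    by_cases hq : k ≤ (day.count key : Int) ∧ 0 < (day.count key : Int)
    · rw [if_pos hq]
      exact ⟨fun _ => hq, fun _ => rfl⟩
    · rw [if_neg hq]
      constructor
      · intro h
        cases h
      · intro h
        exact absurd h hq
  -- SV lookups
  have hSVget : ∀ key, SV.getD key []
      = st.2.2.getD key [] ++
        (if k ≤ (day.count key : Int) ∧ 0 < (day.count key : Int)
         then [(day.count key : Int)] else []) := by
    intro key
    rw [hSV, PySem.Dict.getD_foldl_modify_append]
    congr 1
    rw [hD, dailyOf_items, List.filter_map]
    have hcomp : ((fun p : String × Int => p.1 == key) ∘ fun x => (x, (day.count x : Int)))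
        = fun x => x == key := rfl
    rw [hcomp, filter_beq_of_nodup _ (qualKeys_nodup k day) key]
    by_cases hq : k ≤ (day.count key : Int) ∧ 0 < (day.count key : Int)
    · rw [if_pos ((mem_qualKeys k day key).mpr hq), if_pos hq]
      rfl
    · rw [if_neg (fun hc => hq ((mem_qualKeys k day key).mp hc)), if_neg hq]
      rfl
  -- the trigger fold
  have hkey : ∀ key,
      ((S2.keys.foldl (trigStep n tot SV) (st.1, S2)).2.get? key
          = (if k ≤ (day.count key : Int) ∧ 0 < (day.count key : Int)
             then (if st.2.1.getD key 0 + 1 = n then some (n - 1) else some (st.2.1.getD key 0 + 1))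
             else none)) ∧
      ((S2.keys.foldl (trigStep n tot SV) (st.1, S2)).1.getD key 0
          = st.1.getD key 0 +
            (if k ≤ (day.count key : Int) ∧ 0 < (day.count key : Int) ∧ st.2.1.getD key 0 + 1 = n ∧
                (PySem.List.slice (st.2.2.getD key [] ++ [(day.count key : Int)]) (some (-n)) none).sum ≥ tot
             then 1 else 0)) ∧
      ((S2.keys.foldl (trigStep n tot SV) (st.1, S2)).1.contains key = true ↔
         (st.1.contains key = true ∨ (k ≤ (day.count key : Int) ∧ 0 < (day.count key : Int) ∧
            st.2.1.getD key 0 + 1 = n ∧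
            (PySem.List.slice (st.2.2.getD key [] ++ [(day.count key : Int)]) (some (-n)) none).sum ≥ tot))) := by
    intro key
    by_cases hq : k ≤ (day.count key : Int) ∧ 0 < (day.count key : Int)
    · obtain ⟨t1, t2, t3⟩ := trig_char n tot SV S2.keys hS2nodup (st.1, S2) key ((hS2mem key).mpr hq)
      have hfired : fired n tot SV S2 key
          = decide (st.2.1.getD key 0 + 1 = n ∧
              (PySem.List.slice (st.2.2.getD key [] ++ [(day.count key : Int)]) (some (-n)) none).sum ≥ tot) := by
        unfold fired
        rw [hS2getD key, if_pos hq, hSVget key, if_pos hq]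
        by_cases hc : st.2.1.getD key 0 + 1 = n
        · by_cases hs : ((PySem.List.slice (st.2.2.getD key [] ++ [(day.count key : Int)]) (some (-n)) none).sum ≥ tot)
          · simp [hc, hs]
          · simp [hc, hs]
        · simp [hc]
      refine ⟨?_, ?_, ?_⟩
      · rw [t1, hS2getD key, if_pos hq, if_pos hq]
        by_cases hc : st.2.1.getD key 0 + 1 = n
        · rw [if_pos hc, if_pos hc, hc]
        · rw [if_neg hc, if_neg hc, hS2get key, if_pos hq]
      · rw [t2, hfired]
        by_cases hcond : (st.2.1.getD key 0 + 1 = n ∧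
            (PySem.List.slice (st.2.2.getD key [] ++ [(day.count key : Int)]) (some (-n)) none).sum ≥ tot)
        · have hcd : k ≤ (day.count key : Int) ∧ 0 < (day.count key : Int) ∧
              st.2.1.getD key 0 + 1 = n ∧
              (PySem.List.slice (st.2.2.getD key [] ++ [(day.count key : Int)]) (some (-n)) none).sum ≥ tot :=
            ⟨hq.1, hq.2, hcond.1, hcond.2⟩
          rw [decide_eq_true hcond, if_pos hcd]
          simp
        · have hcd : ¬(k ≤ (day.count key : Int) ∧ 0 < (day.count key : Int) ∧
              st.2.1.getD key 0 + 1 = n ∧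
              (PySem.List.slice (st.2.2.getD key [] ++ [(day.count key : Int)]) (some (-n)) none).sum ≥ tot) := by
            rintro ⟨_, _, h3, h4⟩
            exact hcond ⟨h3, h4⟩
          rw [decide_eq_false hcond, if_neg hcd]
          simp
      · rw [t3, hfired]
        by_cases hcond : (st.2.1.getD key 0 + 1 = n ∧
            (PySem.List.slice (st.2.2.getD key [] ++ [(day.count key : Int)]) (some (-n)) none).sum ≥ tot)
        · rw [decide_eq_true hcond]
          simp only [Bool.or_true, true_iff]
          exact Or.inr ⟨hq.1, hq.2, hcond.1, hcond.2⟩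
        · rw [decide_eq_false hcond]
          simp only [Bool.or_false]
          constructor
          · exact Or.inl
          · rintro (h | h)
            · exact h
            · exact absurd ⟨h.2.2.1, h.2.2.2⟩ hcond
    · have hnm : key ∉ S2.keys := fun hc => hq ((hS2mem key).mp hc)
      obtain ⟨u1, u2⟩ := trig_not_mem n tot SV S2.keys (st.1, S2) key hnm
      refine ⟨?_, ?_, ?_⟩
      · rw [u2, hS2get key, if_neg hq, if_neg hq]
      · rw [PySem.Dict.getD_eq_get?_getD, u1, ← PySem.Dict.getD_eq_get?_getD,
          if_neg (fun hc => hq ⟨hc.1, hc.2.1⟩)]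
        simp
      · rw [contains_eq_isSome, u1, ← contains_eq_isSome]
        constructor
        · exact Or.inl
        · rintro (h | h)
          · exact h
          · exact absurd ⟨h.1, h.2.1⟩ hq
  refine ⟨⟨?_, ?_, ?_⟩, ?_⟩
  · exact trig_fst_nodup n tot SV S2.keys (st.1, S2) hG.1
  · exact trig_snd_nodup n tot SV S2.keys (st.1, S2) hS2nodup
  · intro key
    obtain ⟨h1, h2, h3⟩ := hkey key
    rw [h2, h3]
    have hold : (0 : Int) ≤ st.1.getD key 0 := by
      by_cases hc : st.1.contains key = true
      · have := (hG.2.2 key).mp hc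
        omega
      · have hcf : st.1.contains key = false := by
          cases hcc : st.1.contains key
          · rfl
          · exact absurd hcc hc
        have hn2 : st.1.get? key = none :=
          (PySem.Dict.get?_eq_none_iff_contains _ _).mpr hcf
        rw [PySem.Dict.getD_eq_get?_getD, hn2]
        simp
    by_cases hcond : (k ≤ (day.count key : Int) ∧ 0 < (day.count key : Int) ∧
        st.2.1.getD key 0 + 1 = n ∧
        (PySem.List.slice (st.2.2.getD key [] ++ [(day.count key : Int)]) (some (-n)) none).sum ≥ tot)
    · rw [if_pos hcond]
      constructor
      · intro _; omega
      · intro _; exact Or.inr hcond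
    · rw [if_neg hcond]
      simp only [add_zero]
      constructor
      · rintro (h | h)
        · exact (hG.2.2 key).mp h
        · exact absurd h hcond
      · intro h
        exact Or.inl ((hG.2.2 key).mpr h)
  · intro key
    obtain ⟨h1, h2, h3⟩ := hkey key
    refine ⟨?_, h1, h2, h3⟩
    rw [hSVget key]
    by_cases hq : k ≤ (day.count key : Int) ∧ 0 < (day.count key : Int)
    · rw [if_pos hq, if_pos hq]
    · rw [if_neg hq, if_neg hq, List.append_nil]

-- ---- the simulation-- ---- the simulation (1 ≤ n) ----

theorem step_sim (n k tot : Int) (hn : 1 ≤ n)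
    (st : PySem.Dict String Int × PySem.Dict String Int × PySem.Dict String (List Int))
    (day : List String) (hG : GInv st) (key : String) (b : Int × List Int × Int × Int)
    (hR : PRel n key st b) :
    PRel n key (solutionStep n k tot st day)
      (solutionScanStep n k tot key b (PySem.Dict.counter day)) := by
  obtain ⟨run, win, wsum, cnt⟩ := b
  obtain ⟨r1, r2, r3, r4, r5, pre, r6⟩ := hR
  obtain ⟨hG', hkey⟩ := stepA_char n k tot st day hG
  obtain ⟨h1, h2, h3, h4⟩ := hkey key
  have hcd : (PySem.Dict.counter day).getD key 0 = (day.count key : Int) :=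
    PySem.Dict.getD_counter day key
  dsimp only at r1 r2 r3 r4 r5 r6
  have hold : st.2.1.getD key 0 = if run = 0 then 0 else (if n ≤ run then n - 1 else run) := by
    rw [PySem.Dict.getD_eq_get?_getD, r2]
    split_ifs <;> rfl
  by_cases hq : k ≤ (day.count key : Int) ∧ 0 < (day.count key : Int)
  · have hq' : (day.count key : Int) ≥ k ∧ 0 < (day.count key : Int) := ⟨hq.1, hq.2⟩
    by_cases hbn : n ≤ run
    · -- window already full: B pops, A's streak value stays n - 1
      have hrun0 : ¬ run = 0 := by omega
      have holdv : st.2.1.getD key 0 = n - 1 := by rw [hold, if_neg hrun0, if_pos hbn]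
      have hlenN : win.length = n.toNat := by
        have := r4
        rw [min_eq_right hbn] at this
        omega
      cases win with
      | nil =>
          rw [List.length_nil] at hlenN
          omega
      | cons hd tl =>
        have htl : tl.length + 1 = n.toNat := by
          rw [List.length_cons] at hlenN
          omega
        have hpop : (((hd :: (tl ++ [(day.count key : Int)])).length : Int) > n) := by
          rw [List.length_cons, List.length_append, List.length_singleton]
          push_cast
          omega
        have hB : solutionScanStep n k tot key (run, hd :: tl, wsum, cnt) (PySem.Dict.counter day)
            = (run + 1, tl ++ [(day.count key : Int)], wsum + (day.count key : Int) - hd,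
               if n ≤ run + 1 ∧ wsum + (day.count key : Int) - hd ≥ tot then cnt + 1 else cnt) := by
          unfold solutionScanStep
          rw [hcd]
          simp only [List.cons_append, if_pos hq', if_pos hpop, List.drop_one,
            List.tail_cons, List.headD_cons]
          split_ifs <;> rfl
        rw [hB]
        unfold PRel
        dsimp only
        have hfire1 : st.2.1.getD key 0 + 1 = n := by omega
        have hslice : (PySem.List.slice ((pre ++ hd :: tl) ++ [(day.count key : Int)]) (some (-n)) none)
            = tl ++ [(day.count key : Int)] := by
          have hX : (pre ++ hd :: tl) ++ [(day.count key : Int)]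
              = (pre ++ [hd]) ++ (tl ++ [(day.count key : Int)]) := by simp
          rw [hX, (by omega : (-n : Int) = -((n.toNat : Nat) : Int)),
            PySem.List.slice_from_neg_natCast _ n.toNat (by omega)]
          have hlen2 : ((pre ++ [hd]) ++ (tl ++ [(day.count key : Int)])).length - n.toNat
              = (pre ++ [hd]).length := by
            simp only [List.length_append, List.length_cons, List.length_nil]
            omega
          rw [hlen2, List.drop_left]
        have hsum : (tl ++ [(day.count key : Int)]).sum = wsum + (day.count key : Int) - hd := by
          rw [List.sum_append, List.sum_singleton]
          rw [List.sum_cons] at r5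
          omega
        refine ⟨?_, ?_, by omega, ?_, ?_, pre ++ [hd], ?_⟩
        · rw [h3, r1]
          simp only [r6, hslice, hsum]
          by_cases hs : wsum + (day.count key : Int) - hd ≥ tot
          · rw [if_pos ⟨hq.1, hq.2, hfire1, hs⟩, if_pos ⟨by omega, hs⟩]
          · rw [if_neg (by rintro ⟨-, -, -, hss⟩; exact hs hss),
              if_neg (by rintro ⟨-, hss⟩; exact hs hss)]
            omega
        · rw [h2, if_pos hq, if_pos hfire1, if_neg (by omega : ¬ run + 1 = 0),
            if_pos (by omega : n ≤ run + 1)]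
        · rw [List.length_append, List.length_singleton, min_eq_right (by omega : n ≤ run + 1)]
          push_cast
          omega
        · exact hsum.symm
        · rw [h1, if_pos hq, r6]
          simp
    · -- window still growing: no pop
      have holdv : st.2.1.getD key 0 = run := by
        rw [hold]
        by_cases h0 : run = 0
        · rw [if_pos h0, h0]
        · rw [if_neg h0, if_neg hbn]
      have hlen : (win.length : Int) = run := by
        rw [r4, min_eq_left (by omega)]
      have hnopop : ¬ (((win ++ [(day.count key : Int)]).length : Int) > n) := by
        rw [List.length_append, List.length_singleton]
        push_cast
        omega
      have hB : solutionScanStep n k tot key (run, win, wsum, cnt) (PySem.Dict.counter day)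
          = (run + 1, win ++ [(day.count key : Int)], wsum + (day.count key : Int),
             if n ≤ run + 1 ∧ wsum + (day.count key : Int) ≥ tot then cnt + 1 else cnt) := by
        unfold solutionScanStep
        rw [hcd]
        simp only [if_pos hq', if_neg hnopop]
        split_ifs <;> rfl
      rw [hB]
      unfold PRel
      dsimp only
      have hsum : (win ++ [(day.count key : Int)]).sum = wsum + (day.count key : Int) := by
        rw [List.sum_append, List.sum_singleton]
        omega
      by_cases hfr : run + 1 = n
      · have hslice : (PySem.List.slice ((pre ++ win) ++ [(day.count key : Int)]) (some (-n)) none)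
            = win ++ [(day.count key : Int)] := by
          rw [List.append_assoc, (by omega : (-n : Int) = -((n.toNat : Nat) : Int)),
            PySem.List.slice_from_neg_natCast _ n.toNat (by omega)]
          have hlen2 : (pre ++ (win ++ [(day.count key : Int)])).length - n.toNat = pre.length := by
            simp only [List.length_append, List.length_cons, List.length_nil]
            omega
          rw [hlen2, List.drop_left]
        refine ⟨?_, ?_, by omega, ?_, ?_, pre, ?_⟩
        · rw [h3, r1]
          simp only [r6, hslice, hsum]
          by_cases hs : wsum + (day.count key : Int) ≥ tot
          · rw [if_pos ⟨hq.1, hq.2, by omega, hs⟩, if_pos ⟨by omega, hs⟩]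
          · rw [if_neg (by rintro ⟨-, -, -, hss⟩; exact hs hss),
              if_neg (by rintro ⟨-, hss⟩; exact hs hss)]
            omega
        · rw [h2, if_pos hq, if_pos (by omega : st.2.1.getD key 0 + 1 = n),
            if_neg (by omega : ¬ run + 1 = 0), if_pos (by omega : n ≤ run + 1)]
        · rw [List.length_append, List.length_singleton, min_eq_right (by omega : n ≤ run + 1)]
          push_cast
          omega
        · exact hsum.symm
        · rw [h1, if_pos hq, r6]
          simp
      · refine ⟨?_, ?_, by omega, ?_, ?_, pre, ?_⟩
        · rw [h3, r1]
          rw [if_neg (by rintro ⟨-, -, hff, -⟩; omega),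
            if_neg (by rintro ⟨hff, -⟩; omega)]
          omega
        · rw [h2, if_pos hq, if_neg (by omega : ¬ st.2.1.getD key 0 + 1 = n),
            if_neg (by omega : ¬ run + 1 = 0), if_neg (by omega : ¬ n ≤ run + 1)]
          rw [holdv]
        · rw [List.length_append, List.length_singleton, min_eq_left (by omega : run + 1 ≤ n)]
          push_cast
          omega
        · exact hsum.symm
        · rw [h1, if_pos hq, r6]
          simp
  · -- the key does not qualify today: A drops it from seq, B resets
    have hq' : ¬ ((day.count key : Int) ≥ k ∧ 0 < (day.count key : Int)) := by
      rintro ⟨ha, hb⟩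
      exact hq ⟨ha, hb⟩
    have hB : solutionScanStep n k tot key (run, win, wsum, cnt) (PySem.Dict.counter day)
        = (0, [], 0, cnt) := by
      unfold solutionScanStep
      rw [hcd]
      simp only [if_neg hq']
    rw [hB]
    unfold PRel
    dsimp only
    refine ⟨?_, ?_, le_refl 0, ?_, by simp, st.2.2.getD key [], ?_⟩
    · rw [h3, r1, if_neg (by rintro ⟨ha, hb, -, -⟩; exact hq ⟨ha, hb⟩)]
      omega
    · rw [h2, if_neg hq, if_pos rfl]
    · rw [min_eq_left (le_of_lt (by omega : (0:Int) < n))]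
      simp
    · rw [h1, if_neg hq]
      simp

theorem fold_sim (n k tot : Int) (hn : 1 ≤ n) (days : List (List String))
    (st : PySem.Dict String Int × PySem.Dict String Int × PySem.Dict String (List Int))
    (hG : GInv st) (b : String → Int × List Int × Int × Int)
    (hR : ∀ key, PRel n key st (b key)) :
    GInv (aFold n k tot days st) ∧
    ∀ key, PRel n key (aFold n k tot days st) (bScan n k tot key days (b key)) := by
  induction days generalizing st b with
  | nil => exact ⟨hG, hR⟩
  | cons day rest ih =>
      unfold aFold bScan
      simp only [List.foldl_cons]
      exact ih (solutionStep n k tot st day) ((stepA_char n k tot st day hG).1)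
        (fun key => solutionScanStep n k tot key (b key) (PySem.Dict.counter day))
        (fun key => step_sim n k tot hn st day hG key (b key) (hR key))

-- ---- the degenerate n ≤ 0 side ----

theorem fold_nonpos (n k tot : Int) (hn : n ≤ 0) (days : List (List String))
    (st : PySem.Dict String Int × PySem.Dict String Int × PySem.Dict String (List Int))
    (hG : GInv st) (hP : ∀ key, st.1.contains key = false)
    (hv : ∀ key v, st.2.1.get? key = some v → 1 ≤ v) :
    ∀ key, (aFold n k tot days st).1.contains key = false := by
  induction days generalizing st with
  | nil => exact hP
  | cons day rest ih =>
      unfold aFold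
      simp only [List.foldl_cons]
      obtain ⟨hG', hchar⟩ := stepA_char n k tot st day hG
      have holdpos : ∀ key, ¬ st.2.1.getD key 0 + 1 = n := by
        intro key hc
        have h0 : (0 : Int) ≤ st.2.1.getD key 0 := by
          rw [PySem.Dict.getD_eq_get?_getD]
          cases hg : st.2.1.get? key with
          | none => simp
          | some v =>
              have := hv key v hg
              simp
              omega
        omega
      apply ih (solutionStep n k tot st day) hG'
      · intro key
        obtain ⟨-, -, -, h4⟩ := hchar key
        cases hcc : (solutionStep n k tot st day).1.contains key
        · rfl
        · rcases h4.mp hcc with h | h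
          · rw [hP key] at h
            cases h
          · exact absurd h.2.2.1 (holdpos key)
      · intro key v hg
        obtain ⟨-, h2, -, -⟩ := hchar key
        rw [h2] at hg
        by_cases hq : k ≤ (day.count key : Int) ∧ 0 < (day.count key : Int)
        · rw [if_pos hq] at hg
          by_cases hc : st.2.1.getD key 0 + 1 = n
          · exact absurd hc (holdpos key)
          · rw [if_neg hc] at hg
            have h0 : (0 : Int) ≤ st.2.1.getD key 0 := by
              rw [PySem.Dict.getD_eq_get?_getD]
              cases hg2 : st.2.1.get? key with
              | none => simp
              | some w =>
                  have := hv key w hg2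
                  simp
                  omega
            cases hg
            omega
        · rw [if_neg hq] at hg
          cases hg

-- ---- B's issue dict ----
-- ---- B's issue dict ----

theorem bScan_cnt_absent (n k tot : Int) (key : String) (days : List (List String))
    (st : Int × List Int × Int × Int)
    (h : ∀ day ∈ days, day.count key = 0) :
    (bScan n k tot key days st).2.2.2 = st.2.2.2 := by
  induction days generalizing st with
  | nil => rfl
  | cons day rest ih =>
      have hc0 : (day.count key : Int) = 0 := by
        rw [h day (List.mem_cons_self ..)]
        rfl
      have hstep : (solutionScanStep n k tot key st (PySem.Dict.counter day)).2.2.2 = st.2.2.2 := by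
        unfold solutionScanStep
        dsimp only
        rw [PySem.Dict.getD_counter, hc0, if_neg (by rintro ⟨-, hb⟩; omega)]
      have hfold : bScan n k tot key (day :: rest) st
          = bScan n k tot key rest (solutionScanStep n k tot key st (PySem.Dict.counter day)) := rfl
      rw [hfold, ih _ (fun d hd => h d (List.mem_cons_of_mem _ hd)), hstep]

theorem cnt_zero_of_absent (n k tot : Int) (key : String) (days : List (List String))
    (h : ∀ day ∈ days, day.count key = 0) : cntOf n k tot key days = 0 :=
  bScan_cnt_absent n k tot key days (0, [], 0, 0) h

-- ---- B's issue dict, and the final aggregation ----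

theorem issueB_not_mem (f : String → Int) (l : List String) (iss : PySem.Dict String Int)
    (key : String) (h : key ∉ l) :
    (l.foldl (fun iss key => if 0 < f key then iss.insert key (f key) else iss) iss).get? key
      = iss.get? key := by
  induction l generalizing iss with
  | nil => rfl
  | cons k0 tail ih =>
      simp only [List.mem_cons] at h
      push Not at h
      simp only [List.foldl_cons]
      rw [ih _ h.2]
      split_ifs
      · exact PySem.Dict.get?_insert_of_ne _ _ h.1
      · rfl

theorem issueB_get? (f : String → Int) (l : List String) (hl : l.Nodup)
    (iss : PySem.Dict String Int) (key : String) :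
    (l.foldl (fun iss key => if 0 < f key then iss.insert key (f key) else iss) iss).get? key
      = if key ∈ l ∧ 0 < f key then some (f key) else iss.get? key := by
  induction l generalizing iss with
  | nil => simp
  | cons k0 tail ih =>
      simp only [List.nodup_cons] at hl
      simp only [List.foldl_cons]
      by_cases hk : key = k0
      · subst hk
        rw [issueB_not_mem f tail _ key hl.1]
        by_cases hf : 0 < f key
        · rw [if_pos hf, if_pos ⟨List.mem_cons_self .., hf⟩]
          exact PySem.Dict.get?_insert_self _ _ _
        · rw [if_neg hf, if_neg (by rintro ⟨-, hff⟩; exact hf hff)]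
      · rw [ih hl.2]
        have hstep : ((if 0 < f k0 then iss.insert k0 (f k0) else iss) : PySem.Dict String Int).get? key
            = iss.get? key := by
          split_ifs
          · exact PySem.Dict.get?_insert_of_ne _ _ hk
          · rfl
        rw [hstep]
        by_cases hm : key ∈ tail ∧ 0 < f key
        · rw [if_pos hm, if_pos ⟨List.mem_cons_of_mem _ hm.1, hm.2⟩]
        · rw [if_neg hm, if_neg (by
            rintro ⟨hmm, hff⟩
            rcases List.mem_cons.mp hmm with h | h
            · exact hk h
            · exact hm ⟨h, hff⟩)]

theorem issueB_nodup (f : String → Int) (l : List String) (iss : PySem.Dict String Int)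
    (h : iss.keys.Nodup) :
    (l.foldl (fun iss key => if 0 < f key then iss.insert key (f key) else iss) iss).keys.Nodup := by
  induction l generalizing iss with
  | nil => exact h
  | cons k0 tail ih =>
      simp only [List.foldl_cons]
      apply ih
      split_ifs
      · exact PySem.Dict.nodup_keys_insert _ _ _ h
      · exact h

theorem dict_items_perm (dA dB : PySem.Dict String Int)
    (hA : dA.keys.Nodup) (hB : dB.keys.Nodup)
    (hsame : ∀ key, dA.get? key = dB.get? key) : dA.items.Perm dB.items := by
  have hkmem : ∀ key, key ∈ dA.keys ↔ key ∈ dB.keys := by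
    intro key
    rw [← PySem.Dict.contains_iff_mem_keys, ← PySem.Dict.contains_iff_mem_keys,
      contains_eq_isSome, contains_eq_isSome, hsame key]
  have hkperm : dA.keys.Perm dB.keys := (List.perm_ext_iff_of_nodup hA hB).mpr hkmem
  rw [PySem.Dict.items_eq_map_keys dA hA 0, PySem.Dict.items_eq_map_keys dB hB 0]
  have hfun : ∀ key ∈ dB.keys, (key, dA.getD key 0) = (key, dB.getD key 0) := by
    intro key _
    rw [PySem.Dict.getD_eq_get?_getD, PySem.Dict.getD_eq_get?_getD, hsame key]
  calc (dA.keys.map (fun k => (k, dA.getD k 0))).Perm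
        (dB.keys.map (fun k => (k, dA.getD k 0))) := hkperm.map _
    _ = dB.keys.map (fun k => (k, dB.getD k 0)) := List.map_congr_left hfun

theorem final_eq (dA dB : PySem.Dict String Int)
    (hA : dA.keys.Nodup) (hB : dB.keys.Nodup)
    (hsame : ∀ key, dA.get? key = dB.get? key) :
    (match PySem.List.sorted (dA.items.foldl
        (fun r ab => if PySem.List.max? dA.values (fun v => v) = some ab.2 then r ++ [ab.1] else r) [])
        (fun x => x) with
     | [] => "None"
     | x :: _ => x)
    = (if dB.items.isEmpty then "None" else
       match PySem.List.max? dB.values (fun v => v) with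
       | none => "None"
       | some best =>
         match PySem.List.min? ((dB.items.filter (fun p => decide (p.2 = best))).map (fun p => p.1))
             (fun s => s) with
         | none => "None"
         | some m => m) := by
  have hperm : dA.items.Perm dB.items := dict_items_perm dA dB hA hB hsame
  by_cases hemp : dB.items = []
  · have hempA : dA.items = [] := (hemp ▸ hperm).eq_nil
    rw [hempA, hemp]
    rfl
  · have hne : dB.items.isEmpty = false := by
      cases hbb : dB.items
      · exact absurd hbb hemp
      · rfl
    rw [hne]
    simp only [Bool.false_eq_true, if_false]
    have hvperm : dA.values.Perm dB.values := by
      rw [show dA.values = dA.items.map (fun p : String × Int => p.2) from rfl,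
        show dB.values = dB.items.map (fun p : String × Int => p.2) from rfl]
      exact hperm.map _
    have hvBne : dB.values ≠ [] := by
      intro hcc
      exact hemp (List.map_eq_nil_iff.mp hcc)
    cases hmaxB : PySem.List.max? dB.values (fun v => v) with
    | none =>
        rw [PySem.List.max?_eq_none_iff] at hmaxB
        exact absurd hmaxB hvBne
    | some M =>
      cases hmaxA : PySem.List.max? dA.values (fun v => v) with
      | none =>
          rw [PySem.List.max?_eq_none_iff] at hmaxA
          rw [hmaxA] at hvperm
          exact absurd hvperm.symm.eq_nil hvBne
      | some MA =>
        have hMA : MA = M := by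
          have h1a : MA ∈ dA.values := PySem.List.max?_mem hmaxA
          have h1 : MA ∈ dB.values := hvperm.mem_iff.mp h1a
          have h2a : M ∈ dB.values := PySem.List.max?_mem hmaxB
          have h2 : M ∈ dA.values := hvperm.mem_iff.mpr h2a
          exact le_antisymm (PySem.List.max?_isMax hmaxB MA h1) (PySem.List.max?_isMax hmaxA M h2)
        subst hMA
        -- A's accumulating loop is filter + map
        rw [PySem.List.foldl_append_ite
          (fun ab : String × Int => (some MA : Option Int) = some ab.2)
          (fun ab : String × Int => ab.1) dA.items []]
        simp only [List.nil_append]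
        have hfeq : ∀ ab ∈ dA.items,
            (decide (some MA = some ab.2)) = (decide (ab.2 = MA)) := by
          intro ab _
          by_cases h : ab.2 = MA
          · rw [decide_eq_true (by rw [h]), decide_eq_true h]
          · rw [decide_eq_false (by
              intro hcc
              exact h (Option.some.injEq .. ▸ hcc).symm), decide_eq_false h]
        rw [List.filter_congr hfeq]
        have hcperm : ((dA.items.filter (fun ab => decide (ab.2 = MA))).map (fun ab => ab.1)).Perm
            ((dB.items.filter (fun p => decide (p.2 = MA))).map (fun p => p.1)) :=
          (hperm.filter _).map _
        have hcBne : (dB.items.filter (fun p => decide (p.2 = MA))).map (fun p => p.1) ≠ [] := by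
          have hMmemA : MA ∈ dA.values := PySem.List.max?_mem hmaxA
          have hMmem : MA ∈ dB.values := hvperm.mem_iff.mp hMmemA
          obtain ⟨p, hp, hp2⟩ := List.mem_map.mp hMmem
          intro hcc
          have : p ∈ dB.items.filter (fun p => decide (p.2 = MA)) :=
            List.mem_filter.mpr ⟨hp, decide_eq_true hp2⟩
          rw [List.map_eq_nil_iff.mp hcc] at this
          cases this
        cases hsortA : PySem.List.sorted
            ((dA.items.filter (fun ab => decide (ab.2 = MA))).map (fun ab => ab.1)) (fun x => x) with
        | nil =>
            rw [PySem.List.sorted_eq_nil_iff] at hsortA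
            rw [hsortA] at hcperm
            exact absurd hcperm.symm.eq_nil hcBne
        | cons x t =>
          cases hminB : PySem.List.min? ((dB.items.filter (fun p => decide (p.2 = MA))).map
              (fun p => p.1)) (fun s => s) with
          | none =>
              rw [PySem.List.min?_eq_none_iff] at hminB
              exact absurd hminB hcBne
          | some m =>
            have hxmem : x ∈ (dA.items.filter (fun ab => decide (ab.2 = MA))).map (fun ab => ab.1) := by
              rw [← PySem.List.mem_sorted _ (fun x => x) false, hsortA]
              exact List.mem_cons_self ..
            have hmmem : m ∈ (dA.items.filter (fun ab => decide (ab.2 = MA))).map (fun ab => ab.1) :=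
              hcperm.mem_iff.mpr (PySem.List.min?_mem hminB)
            have h1 : x ≤ m := PySem.List.key_head_sorted_le _ _ hsortA m hmmem
            have h2 : m ≤ x := PySem.List.min?_isMin hminB x (hcperm.mem_iff.mp hxmem)
            exact le_antisymm h1 h2

-- ===== VERDICT (by name: the statement is the Claim_ definition above) =====
theorem solution_spec : Claim_equal_solution := by
  intro research n k hdom
  unfold Spec_solution
  have hfold : List.foldl (fun st i => solutionStep n k (2*n*k) st (PySem.List.pyGetD research i []))
        (PySem.Dict.empty, PySem.Dict.empty, PySem.Dict.empty)
        (PySem.List.pyRange 0 (PySem.List.len research))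
      = aFold n k (2*n*k) research (PySem.Dict.empty, PySem.Dict.empty, PySem.Dict.empty) := by
    unfold aFold
    rw [PySem.List.foldl_pyRange_pyGetD research [] (solutionStep n k (2*n*k))
      (PySem.Dict.empty, PySem.Dict.empty, PySem.Dict.empty) (le_refl 0)]
    simp
  have hG0 : GInv (PySem.Dict.empty, PySem.Dict.empty, PySem.Dict.empty) := by
    refine ⟨List.nodup_nil, List.nodup_nil, ?_⟩
    intro key
    simp [PySem.Dict.contains_empty, PySem.Dict.getD_empty]
  by_cases hn : n ≤ 0
  · -- degenerate n: A never triggers and returns "None", B returns "None" up front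
    have hnone : ∀ key, (aFold n k (2*n*k) research
        (PySem.Dict.empty, PySem.Dict.empty, PySem.Dict.empty)).1.contains key = false := by
      apply fold_nonpos n k (2*n*k) hn research _ hG0
      · intro key
        exact PySem.Dict.contains_empty key
      · intro key v hv
        rw [PySem.Dict.get?_empty] at hv
        cases hv
    have hkeys : (aFold n k (2*n*k) research
        (PySem.Dict.empty, PySem.Dict.empty, PySem.Dict.empty)).1.keys = [] := by
      rw [List.eq_nil_iff_forall_not_mem]
      intro key hmem
      have := (PySem.Dict.contains_iff_mem_keys _ key).mpr hmem
      rw [hnone key] at this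
      cases this
    have hitems : (aFold n k (2*n*k) research
        (PySem.Dict.empty, PySem.Dict.empty, PySem.Dict.empty)).1.items = [] := by
      have : ((aFold n k (2*n*k) research
          (PySem.Dict.empty, PySem.Dict.empty, PySem.Dict.empty)).1.items.map (fun p => p.1)) = [] :=
        hkeys
      exact List.map_eq_nil_iff.mp this
    simp only [solution, solution_alt, if_pos hn]
    rw [hfold, hitems]
    rfl
  · have hn1 : (1 : Int) ≤ n := by omega
    have hR0 : ∀ key, PRel n key (PySem.Dict.empty, PySem.Dict.empty, PySem.Dict.empty)
        ((fun _ => ((0 : Int), ([] : List Int), (0 : Int), (0 : Int))) key) := by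
      intro key
      refine ⟨by rw [PySem.Dict.getD_empty], by rw [PySem.Dict.get?_empty, if_pos rfl],
        le_refl 0, ?_, rfl, [], by rw [PySem.Dict.getD_empty]; rfl⟩
      rw [min_eq_left (by omega : (0:Int) ≤ n)]
      rfl
    obtain ⟨hGf, hRf⟩ := fold_sim n k (2*n*k) hn1 research _ hG0 _ hR0
    have hbody : (fun (iss : PySem.Dict String Int) key =>
          if 0 < ((research.map (fun day => PySem.Dict.counter day)).foldl
              (solutionScanStep n k (2*n*k) key) ((0:Int), ([]:List Int), (0:Int), (0:Int))).2.2.2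
          then iss.insert key ((research.map (fun day => PySem.Dict.counter day)).foldl
              (solutionScanStep n k (2*n*k) key) ((0:Int), ([]:List Int), (0:Int), (0:Int))).2.2.2
          else iss)
        = (fun (iss : PySem.Dict String Int) key =>
          if 0 < cntOf n k (2*n*k) key research
          then iss.insert key (cntOf n k (2*n*k) key research) else iss) := by
      funext iss key
      rw [List.foldl_map]
      unfold cntOf bScan
      rfl
    have hcov : ∀ key, 1 ≤ cntOf n k (2*n*k) key research
        → key ∈ PySem.List.dedup (research.flatMap (fun day => day)) := by
      intro key h1
      by_contra hnm
      rw [PySem.List.mem_dedup] at hnm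
      have habs : ∀ day ∈ research, day.count key = 0 := by
        intro day hday
        rw [List.count_eq_zero]
        intro hkd
        exact hnm (List.mem_flatMap.mpr ⟨day, hday, hkd⟩)
      rw [cnt_zero_of_absent n k (2*n*k) key research habs] at h1
      omega
    have hAget : ∀ key, (aFold n k (2*n*k) research
        (PySem.Dict.empty, PySem.Dict.empty, PySem.Dict.empty)).1.get? key
        = if key ∈ PySem.List.dedup (research.flatMap (fun day => day))
            ∧ 0 < cntOf n k (2*n*k) key research
          then some (cntOf n k (2*n*k) key research) else none := by
      intro key
      have hcnt : (aFold n k (2*n*k) research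
          (PySem.Dict.empty, PySem.Dict.empty, PySem.Dict.empty)).1.getD key 0
          = cntOf n k (2*n*k) key research := (hRf key).1
      by_cases h1 : 1 ≤ cntOf n k (2*n*k) key research
      · rw [if_pos ⟨hcov key h1, by omega⟩]
        have hcontains : (aFold n k (2*n*k) research
            (PySem.Dict.empty, PySem.Dict.empty, PySem.Dict.empty)).1.contains key = true :=
          (hGf.2.2 key).mpr (by rw [hcnt]; exact h1)
        rw [contains_eq_isSome] at hcontains
        cases hg : (aFold n k (2*n*k) research
            (PySem.Dict.empty, PySem.Dict.empty, PySem.Dict.empty)).1.get? key with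
        | none => rw [hg] at hcontains; cases hcontains
        | some v =>
            rw [PySem.Dict.getD_eq_get?_getD, hg] at hcnt
            rw [← hcnt]
            rfl
      · rw [if_neg (by rintro ⟨-, hp⟩; omega)]
        rw [(PySem.Dict.get?_eq_none_iff_contains _ _).mpr]
        cases hcc : (aFold n k (2*n*k) research
            (PySem.Dict.empty, PySem.Dict.empty, PySem.Dict.empty)).1.contains key
        · rfl
        · have := (hGf.2.2 key).mp hcc
          rw [hcnt] at this
          exact absurd this h1
    have hBget : ∀ key, ((PySem.List.dedup (research.flatMap (fun day => day))).foldl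
          (fun (iss : PySem.Dict String Int) key =>
            if 0 < cntOf n k (2*n*k) key research
            then iss.insert key (cntOf n k (2*n*k) key research) else iss)
          PySem.Dict.empty).get? key
        = if key ∈ PySem.List.dedup (research.flatMap (fun day => day))
            ∧ 0 < cntOf n k (2*n*k) key research
          then some (cntOf n k (2*n*k) key research) else none := by
      intro key
      rw [issueB_get? (fun key => cntOf n k (2*n*k) key research) _
        (PySem.List.nodup_dedup _) PySem.Dict.empty key]
      rw [PySem.Dict.get?_empty]
    have hsame : ∀ key, (aFold n k (2*n*k) research
          (PySem.Dict.empty, PySem.Dict.empty, PySem.Dict.empty)).1.get? key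
        = ((PySem.List.dedup (research.flatMap (fun day => day))).foldl
            (fun (iss : PySem.Dict String Int) key =>
              if 0 < cntOf n k (2*n*k) key research
              then iss.insert key (cntOf n k (2*n*k) key research) else iss)
            PySem.Dict.empty).get? key := by
      intro key
      rw [hAget key, hBget key]
    simp only [solution, solution_alt, if_neg hn]
    rw [hfold, hbody]
    exact final_eq _ _ hGf.1
      (issueB_nodup _ _ PySem.Dict.empty List.nodup_nil) hsame
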